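-- pv_equiv track=rewrite | github.com/JulioBarahonaMartinezUVG/Redes_lab_2 | funciones.py | reemplazarArrayBits
-- ===== SOURCE A (Python) =====
-- def reemplazarArrayBits(data, correcto, r):
--     j = 0
--     k = 1
--     m = len(data)
--     res = ''
--
--     for i in range(1, m + r+1):
--         if(i == 2**j):
--             res = res + correcto[-1 * i]
--             j += 1
--         else:
--             res = res + data[-1 * k]
--             k += 1
--
--     return res[::-1]
-- ===== SOURCE B (Python) =====
-- def reemplazarArrayBits(data, correcto, r):
--     n = len(data) + r
--     out = [None] * max(n, 0)
--     e = 1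
--     while e <= n:                 # place the check bits at the power-of-two slots
--         out[e - 1] = correcto[-e]
--         e *= 2
--     src = reversed(data)          # data bits, consumed from the end of data
--     for t in range(max(n, 0)):
--         if out[t] is None:
--             out[t] = next(src)
--     out.reverse()
--     return ''.join(out)
-- ===== Notes on version B (the rewrite author's own statement) =====
-- stated objective: alternative
-- what changed: Instead of A's single left-to-right scan with running counters choosing a source per position, B preallocates the n slots, writes the check bits directly at positions 1,2,4,... by doubling an index e, then in a second pass fills the remaining empty slots by consuming a reversed-data iterator, and finally reverses in place.
import Mathlib
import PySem

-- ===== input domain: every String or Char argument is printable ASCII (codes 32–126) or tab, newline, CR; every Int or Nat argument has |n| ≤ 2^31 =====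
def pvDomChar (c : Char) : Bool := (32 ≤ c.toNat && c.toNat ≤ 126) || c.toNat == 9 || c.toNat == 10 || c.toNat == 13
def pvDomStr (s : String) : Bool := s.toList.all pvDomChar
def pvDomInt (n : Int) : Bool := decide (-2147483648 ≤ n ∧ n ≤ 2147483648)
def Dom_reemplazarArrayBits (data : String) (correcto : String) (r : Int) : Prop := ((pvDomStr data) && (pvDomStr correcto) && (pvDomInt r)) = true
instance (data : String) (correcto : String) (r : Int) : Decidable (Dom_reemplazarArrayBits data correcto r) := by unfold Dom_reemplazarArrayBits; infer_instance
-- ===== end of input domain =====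

-- B replaces A's single scan with running counters (choosing a source per position)
-- by preallocation and two placement passes: check bits written directly at slots
-- 1,2,4,... by doubling an index, then empty slots filled from a reversed-data
-- iterator, then an in-place reverse (objective: alternative; same cost).

-- ===== PORT A =====
-- loop body of A, lifted to a named helper: state is (j, k, res)
def stepA (data : List Char) (correcto : List Char)
    (st : Nat × Nat × List Char) (i : Int) : Nat × Nat × List Char :=
  match st with
  | (j, k, res) =>
    if i = (2 : Int) ^ j then
      (j + 1, k, res ++ [(PySem.Chars.pyGet? correcto (-1 * i)).getD ' '])
    else
      (j, k + 1, res ++ [(PySem.Chars.pyGet? data (-1 * (k : Int))).getD ' '])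

def reemplazarArrayBits (data : String) (correcto : String) (r : Int) : String :=
  String.ofList ((PySem.List.slice?
      (((PySem.List.pyRange 1 (PySem.Str.len data + r + 1) 1).foldl
          (stepA data.toList correcto.toList) (0, 1, [])).2.2)
      none none (-1)).getD [])

-- ===== PORT B =====
-- Python B's while-loop `while e <= n: out[e-1] = correcto[-e]; e *= 2`;
-- the fuel argument only makes the doubling loop total (n.toNat + 1 iterations suffice)
def placePows (correcto : List Char) (n : Int) (fuel : Nat) (e : Int)
    (out : List (Option Char)) : List (Option Char) :=
  match fuel with
  | 0 => out
  | fuel + 1 =>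
    if e ≤ n then
      placePows correcto n fuel (2 * e)
        (out.set (e - 1).toNat (some ((PySem.Chars.pyGet? correcto (-e)).getD ' ')))
    else out

-- Python B's fill pass: `for t: if out[t] is None: out[t] = next(src)`
def fillData (src : List Char) (out : List (Option Char)) : List Char :=
  match out with
  | [] => []
  | some c :: rest => c :: fillData src rest
  | none :: rest => src.headD ' ' :: fillData src.tail rest

def reemplazarArrayBits_alt (data : String) (correcto : String) (r : Int) : String :=
  -- n = len(data) + r, written out at each use
  String.ofList
    (fillData data.toList.reverse
      (placePows correcto.toList (PySem.Str.len data + r)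
        ((PySem.Str.len data + r).toNat + 1) 1
        (List.replicate (PySem.Str.len data + r).toNat (none : Option Char)))).reverse

-- ===== PRECONDITION & SPEC =====
-- Python's i.bit_length(), exact for i ≥ 0 (the only arguments Pre_ uses it on)
def pyBitLength (i : Int) : Int := if i = 0 then 0 else ((Nat.log2 i.toNat + 1 : Nat) : Int)

-- Pre_ excludes exactly the inputs on which Python A raises IndexError: with
-- n = len(data)+r > 0, A needs the largest power of two ≤ n to index into correcto
-- and n - n.bit_length() data characters; otherwise A returns normally.
def Pre_reemplazarArrayBits (data : String) (correcto : String) (r : Int) : Prop :=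
  PySem.Str.len data + r ≤ 0 ∨
  (PySem.Str.len data + r - pyBitLength (PySem.Str.len data + r) ≤ PySem.Str.len data ∧
   (2 : Int) ^ Nat.log2 (PySem.Str.len data + r).toNat ≤ PySem.Str.len correcto)
instance (data : String) (correcto : String) (r : Int) : Decidable (Pre_reemplazarArrayBits data correcto r) := by unfold Pre_reemplazarArrayBits; infer_instance

def pvWitness_reemplazarArrayBits : String × String × Int := ("abcd", "wxyz", 3)

def Spec_reemplazarArrayBits (data : String) (correcto : String) (r : Int) (out : String) : Prop := out = reemplazarArrayBits_alt data correcto r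
instance (data : String) (correcto : String) (r : Int) (out : String) : Decidable (Spec_reemplazarArrayBits data correcto r out) := by unfold Spec_reemplazarArrayBits; infer_instance

-- ===== CLAIM (what is proved, stated in full; the proofs are below) =====
def Claim_equal_reemplazarArrayBits : Prop := ∀ (data : String) (correcto : String) (r : Int), Dom_reemplazarArrayBits data correcto r → Pre_reemplazarArrayBits data correcto r → Spec_reemplazarArrayBits data correcto r (reemplazarArrayBits data correcto r)

-- ===== LEMMAS AND PROOFS =====

-- the common specification: the character A and B place at (1-based) position i
def bchar (data : List Char) (correcto : List Char) (i : Int) : Char :=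
  if Int.land i (i - 1) = 0 then (PySem.Chars.pyGet? correcto (-i)).getD ' '
  else (PySem.Chars.pyGet? data (-(i - pyBitLength i))).getD ' '

-- number of powers of two in [1, n]
def powCount (n : Nat) : Nat := if n = 0 then 0 else Nat.log2 n + 1

theorem powCount_le (n : Nat) : powCount n ≤ n := by
  unfold powCount
  split
  · omega
  · have h : Nat.log2 n < n := by
      rw [Nat.log2_lt (by omega)]; exact Nat.lt_two_pow_self
    omega

theorem stepA_mk (data correcto : List Char) (j k : Nat) (res : List Char) (i : Int) :
    stepA data correcto (j, k, res) i =
      if i = (2 : Int) ^ j then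
        (j + 1, k, res ++ [(PySem.Chars.pyGet? correcto (-1 * i)).getD ' '])
      else
        (j, k + 1, res ++ [(PySem.Chars.pyGet? data (-1 * (k : Int))).getD ' ']) := rfl

theorem bchar_pow (data correcto : List Char) (i : Int) (h : Int.land i (i - 1) = 0) :
    bchar data correcto i = (PySem.Chars.pyGet? correcto (-i)).getD ' ' := by
  unfold bchar; rw [if_pos h]

theorem bchar_npow (data correcto : List Char) (i : Int) (h : ¬ Int.land i (i - 1) = 0) :
    bchar data correcto i = (PySem.Chars.pyGet? data (-(i - pyBitLength i))).getD ' ' := by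
  unfold bchar; rw [if_neg h]

theorem log2_eq_of_le_of_lt {m a : Nat} (h1 : 2 ^ a ≤ m) (h2 : m < 2 ^ (a + 1)) :
    Nat.log2 m = a := by
  rw [Nat.log2_eq_log_two]
  exact Nat.log_eq_of_pow_le_of_lt_pow h1 h2

theorem pow_log2_le (n : Nat) (h : n ≠ 0) : 2 ^ Nat.log2 n ≤ n := by
  rw [Nat.log2_eq_log_two]
  exact Nat.pow_log_le_self 2 h

theorem lt_pow_log2_succ (n : Nat) (_h : n ≠ 0) : n < 2 ^ (Nat.log2 n + 1) := by
  rw [Nat.log2_eq_log_two]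
  exact Nat.lt_pow_succ_log_self (by omega) n

-- A's running test i == 2**j (with j = powCount (i-1)) detects exactly the powers of two
theorem testA_iff (n : Nat) :
    ((1 + (n : Int)) = 2 ^ powCount n) ↔ 2 ^ Nat.log2 (n + 1) = n + 1 := by
  rw [show (1 + (n : Int)) = ((n + 1 : Nat) : Int) by push_cast; ring,
      show ((2 : Int) ^ powCount n) = ((2 ^ powCount n : Nat) : Int) by push_cast; ring,
      Nat.cast_inj]
  rcases Nat.eq_zero_or_pos n with h0 | hpos
  · subst h0; decide
  · unfold powCount
    rw [if_neg (by omega)]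
    constructor
    · intro h
      have : Nat.log2 (n + 1) = Nat.log2 n + 1 :=
        log2_eq_of_le_of_lt (by omega) (by rw [h]; exact Nat.pow_lt_pow_right (by omega) (by omega))
      rw [this]; omega
    · intro h
      set a := Nat.log2 (n + 1) with ha
      have ha1 : 1 ≤ a := by
        by_contra hc
        have : a = 0 := by omega
        rw [this] at h; simp at h; omega
      have hlog : Nat.log2 n = a - 1 := by
        apply log2_eq_of_le_of_lt
        · have : 2 * 2 ^ (a - 1) = 2 ^ a := by
            rw [← pow_succ']; congr 1; omega
          omega
        · have : 2 ^ (a - 1 + 1) = 2 ^ a := by congr 1; omega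
          omega
      rw [hlog]
      have : 2 ^ (a - 1 + 1) = 2 ^ a := by congr 1; omega
      omega

-- B's test (i & (i-1)) == 0 on Nat
theorem land_succ_iff (n : Nat) :
    ((n + 1) &&& n = 0) ↔ 2 ^ Nat.log2 (n + 1) = n + 1 := by
  constructor
  · intro h
    by_contra hne
    set a := Nat.log2 (n + 1) with ha
    have hle : 2 ^ a ≤ n + 1 := pow_log2_le (n + 1) (by omega)
    have hlt : n + 1 < 2 ^ (a + 1) := lt_pow_log2_succ (n + 1) (by omega)
    have hlen : 2 ^ a ≤ n := by omega
    have h1 : (n + 1).testBit a = true :=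
      Nat.testBit_of_two_pow_le_and_two_pow_add_one_gt (by omega) hlt
    have h2 : n.testBit a = true :=
      Nat.testBit_of_two_pow_le_and_two_pow_add_one_gt hlen (by omega)
    have : ((n + 1) &&& n).testBit a = true := by
      rw [Nat.testBit_land, h1, h2]; rfl
    rw [h] at this
    simp [Nat.zero_testBit] at this
  · intro h
    have key : (2 ^ Nat.log2 (n + 1)) &&& (2 ^ Nat.log2 (n + 1) - 1) = 0 := by
      rw [Nat.and_two_pow_sub_one_eq_mod]; simp
    rw [h] at key
    simpa using key

theorem testB_iff (n : Nat) :
    (Int.land (1 + (n : Int)) (1 + (n : Int) - 1) = 0) ↔ 2 ^ Nat.log2 (n + 1) = n + 1 := by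
  rw [show (1 + (n : Int)) = ((n + 1 : Nat) : Int) by push_cast; ring]
  rw [show (((n + 1 : Nat) : Int) - 1) = ((n : Nat) : Int) by push_cast; ring]
  rw [show Int.land ((n + 1 : Nat) : Int) ((n : Nat) : Int) = (((n + 1) &&& n : Nat) : Int) from rfl]
  rw [show ((((n + 1) &&& n : Nat) : Int) = 0 ↔ ((n + 1) &&& n = 0)) from by omega]
  exact land_succ_iff n

-- powCount over a power-of-two step / a non-power step
theorem powCount_succ_pow (n : Nat) (hp : 2 ^ Nat.log2 (n + 1) = n + 1) :
    powCount (n + 1) = powCount n + 1 := by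
  rcases Nat.eq_zero_or_pos n with h0 | hq
  · subst h0; decide
  · have ha1 : 1 ≤ Nat.log2 (n + 1) := by
      by_contra hc
      have h0 : Nat.log2 (n + 1) = 0 := by omega
      rw [h0, pow_zero] at hp
      omega
    have heq : 2 * 2 ^ (Nat.log2 (n + 1) - 1) = n + 1 := by
      rw [← pow_succ', show Nat.log2 (n + 1) - 1 + 1 = Nat.log2 (n + 1) by omega]
      exact hp
    have hx : 1 ≤ 2 ^ (Nat.log2 (n + 1) - 1) := Nat.one_le_two_pow
    have hlogn : Nat.log2 n = Nat.log2 (n + 1) - 1 :=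
      log2_eq_of_le_of_lt (by omega)
        (by rw [show Nat.log2 (n + 1) - 1 + 1 = Nat.log2 (n + 1) by omega, hp]; omega)
    unfold powCount
    rw [if_neg (by omega), if_neg (by omega), hlogn]
    omega

theorem powCount_succ_npow (n : Nat) (hpos : 1 ≤ n) (hp : ¬ 2 ^ Nat.log2 (n + 1) = n + 1) :
    powCount (n + 1) = powCount n := by
  have hle := pow_log2_le (n + 1) (by omega)
  have hlt := lt_pow_log2_succ (n + 1) (by omega)
  have hlog : Nat.log2 n = Nat.log2 (n + 1) :=
    log2_eq_of_le_of_lt (by omega) (by omega)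
  unfold powCount
  rw [if_neg (by omega), if_neg (by omega), hlog]

-- on non-powers, A's running data index k equals i - i.bit_length()
theorem index_eq (n : Nat) (hpos : 1 ≤ n) (h : ¬ 2 ^ Nat.log2 (n + 1) = n + 1) :
    ((1 + (n - powCount n) : Nat) : Int) = (1 + (n : Int)) - pyBitLength (1 + (n : Int)) := by
  have htn : (1 + (n : Int)).toNat = n + 1 := by omega
  have hbl : pyBitLength (1 + (n : Int)) = ((Nat.log2 (n + 1) + 1 : Nat) : Int) := by
    unfold pyBitLength
    rw [if_neg (by omega), htn]
  have hlogstep : Nat.log2 (n + 1) = Nat.log2 n := by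
    set a := Nat.log2 (n + 1) with ha
    have hle : 2 ^ a ≤ n + 1 := pow_log2_le (n + 1) (by omega)
    have hlt : n + 1 < 2 ^ (a + 1) := lt_pow_log2_succ (n + 1) (by omega)
    exact (log2_eq_of_le_of_lt (by omega) (by omega)).symm
  have hcnt : powCount n = Nat.log2 n + 1 := by unfold powCount; rw [if_neg (by omega)]
  have hln : Nat.log2 n < n := by rw [Nat.log2_lt (by omega)]; exact Nat.lt_two_pow_self
  rw [hbl, hlogstep, hcnt]
  push_cast
  omega

-- loop invariant for A: after positions 1..n the accumulated characters are
-- the spec map over the same range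
theorem fold_inv (data correcto : List Char) (n : Nat) :
    (PySem.List.pyRange 1 (1 + (n : Int)) 1).foldl (stepA data correcto) (0, 1, []) =
      (powCount n, 1 + (n - powCount n),
        (PySem.List.pyRange 1 (1 + (n : Int)) 1).map (bchar data correcto)) := by
  induction n with
  | zero =>
    rw [PySem.List.pyRange_one_eq_nil (by omega)]
    simp [powCount]
  | succ n ih =>
    have hsplit : PySem.List.pyRange 1 (1 + ((n + 1 : Nat) : Int)) 1 =
        PySem.List.pyRange 1 (1 + (n : Int)) 1 ++ [1 + (n : Int)] := by
      have : (1 + ((n + 1 : Nat) : Int)) = (1 + (n : Int)) + 1 := by push_cast; ring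
      rw [this, PySem.List.pyRange_one_succ_right (by omega)]
    rw [hsplit, List.foldl_append, List.map_append, ih]
    simp only [List.foldl_cons, List.foldl_nil, List.map_cons, List.map_nil]
    have hcle := powCount_le n
    by_cases hp : 2 ^ Nat.log2 (n + 1) = n + 1
    · -- position n+1 is a power of two
      have htA : (1 + (n : Int)) = (2 : Int) ^ powCount n := (testA_iff n).mpr hp
      have htB : Int.land (1 + (n : Int)) (1 + (n : Int) - 1) = 0 := (testB_iff n).mpr hp
      rw [stepA_mk, if_pos htA, bchar_pow _ _ _ htB]
      have hcnt := powCount_succ_pow n hp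
      simp only [Prod.mk.injEq]
      refine ⟨by omega, by have := powCount_le (n + 1); omega, ?_⟩
      rw [show (-1 : Int) * (1 + (n : Int)) = -(1 + (n : Int)) by ring]
    · -- position n+1 is not a power of two
      have htA : ¬ (1 + (n : Int)) = (2 : Int) ^ powCount n := fun h => hp ((testA_iff n).mp h)
      have htB : ¬ Int.land (1 + (n : Int)) (1 + (n : Int) - 1) = 0 :=
        fun h => hp ((testB_iff n).mp h)
      rw [stepA_mk, if_neg htA, bchar_npow _ _ _ htB]
      have hpos : 1 ≤ n := by
        by_contra hc
        have : n = 0 := by omega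
        subst this
        exact hp (by decide)
      have hcnt := powCount_succ_npow n hpos hp
      have hidx := index_eq n hpos hp
      simp only [Prod.mk.injEq]
      refine ⟨by omega, by omega, ?_⟩
      rw [show (-1 : Int) * ((1 + (n - powCount n) : Nat) : Int) =
            -((1 + (n : Int)) - pyBitLength (1 + (n : Int))) by rw [← hidx]; ring]

-- ========== B-side characterisation ==========

-- the slot contents after the doubling pass, in closed form
def pchar (correcto : List Char) (t : Nat) : Option Char :=
  if 2 ^ Nat.log2 (t + 1) = t + 1 then
    some ((PySem.Chars.pyGet? correcto (-((t : Int) + 1))).getD ' ')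
  else none

-- the same, restricted to powers below e (the doubling loop's progress measure)
def pcharU (correcto : List Char) (e : Int) (t : Nat) : Option Char :=
  if (t : Int) + 1 < e then pchar correcto t else none

theorem set_step (correcto : List Char) (n : Int) (j : Nat) (h2 : (2 : Int) ^ j ≤ n) :
    ((List.range n.toNat).map (pcharU correcto ((2 : Int) ^ j))).set
        ((2 : Int) ^ j - 1).toNat (some ((PySem.Chars.pyGet? correcto (-(2 : Int) ^ j)).getD ' '))
      = (List.range n.toNat).map (pcharU correcto ((2 : Int) ^ (j + 1))) := by
  have hcast : ((2 : Int) ^ j) = ((2 ^ j : Nat) : Int) := by push_cast; ring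
  have hcast2 : ((2 : Int) ^ (j + 1)) = ((2 ^ (j + 1) : Nat) : Int) := by push_cast; ring
  have hE1 : 1 ≤ 2 ^ j := Nat.one_le_two_pow
  have hEE : (2 ^ j : Nat) < 2 ^ (j + 1) := Nat.pow_lt_pow_right (by omega) (by omega)
  have hEn : (2 ^ j : Nat) ≤ n.toNat := by omega
  have hidx : ((2 : Int) ^ j - 1).toNat = 2 ^ j - 1 := by omega
  apply List.ext_getElem
  · simp
  · intro t h1 h2'
    have ht : t < n.toNat := by simpa using h2'
    rw [List.getElem_set]
    simp only [List.getElem_map, List.getElem_range]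
    by_cases he : t = 2 ^ j - 1
    · rw [if_pos (show ((2:Int)^j - 1).toNat = t by omega)]
      have htpow : t + 1 = 2 ^ j := by omega
      unfold pcharU pchar
      rw [if_pos (by rw [hcast2]; omega)]
      rw [if_pos (by rw [htpow, Nat.log2_two_pow])]
      rw [show (-(2 : Int) ^ j) = -((t : Int) + 1) by rw [hcast]; push_cast; omega]
    · rw [if_neg (show ¬ ((2:Int)^j - 1).toNat = t by omega)]
      unfold pcharU
      by_cases hlt : (t : Int) + 1 < (2 : Int) ^ j
      · rw [if_pos hlt, if_pos (by rw [hcast2]; rw [hcast] at hlt; omega)]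
      · rw [if_neg hlt]
        by_cases hlt2 : (t : Int) + 1 < (2 : Int) ^ (j + 1)
        · rw [if_pos hlt2]
          have hb1 : 2 ^ j < t + 1 := by rw [hcast] at hlt; omega
          have hb2 : t + 1 < 2 ^ (j + 1) := by rw [hcast2] at hlt2; omega
          have hlog : Nat.log2 (t + 1) = j := log2_eq_of_le_of_lt (by omega) hb2
          unfold pchar
          rw [if_neg (by rw [hlog]; omega)]
        · rw [if_neg hlt2]

theorem place_inv (correcto : List Char) (n : Int) :
    ∀ (fuel : Nat) (j : Nat), n < 2 ^ j * fuel →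
      placePows correcto n fuel ((2 : Int) ^ j)
          ((List.range n.toNat).map (pcharU correcto ((2 : Int) ^ j)))
        = (List.range n.toNat).map (pchar correcto) := by
  intro fuel
  induction fuel with
  | zero =>
    intro j hf
    have : n < 0 := by simpa using hf
    have : n.toNat = 0 := by omega
    rw [this]
    simp [placePows]
  | succ fuel ih =>
    intro j hf
    have hcast : ((2 : Int) ^ j) = ((2 ^ j : Nat) : Int) := by push_cast; ring
    have hcast2 : ((2 : Int) ^ (j + 1)) = ((2 ^ (j + 1) : Nat) : Int) := by push_cast; ring
    have hE1 : (1 : Nat) ≤ 2 ^ j := Nat.one_le_two_pow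
    by_cases he : (2 : Int) ^ j ≤ n
    · rw [placePows, if_pos he, set_step correcto n j he,
          show (2 * (2 : Int) ^ j) = (2 : Int) ^ (j + 1) by ring]
      apply ih
      have hfuel1 : 1 ≤ fuel := by
        by_contra hc
        have hf0 : fuel = 0 := by omega
        subst hf0
        simp at hf
        rw [hcast] at he
        rw [hcast] at hf
        omega
      have hnat : (2 ^ j : Nat) * (fuel + 1) ≤ 2 ^ (j + 1) * fuel := by
        rw [pow_succ]
        nlinarith
      have hcle : (((2 ^ j : Nat) * (fuel + 1) : Nat) : Int) ≤ (((2 ^ (j + 1) : Nat) * fuel : Nat) : Int) := by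
        exact_mod_cast hnat
      push_cast at hcle hf ⊢
      linarith
    · rw [placePows, if_neg he]
      apply List.map_congr_left
      intro t ht
      have ht' : t < n.toNat := List.mem_range.mp ht
      unfold pcharU
      rw [if_pos (by rw [hcast] at he ⊢; omega)]

-- the fill pass appends pointwise from the right
def countNones (out : List (Option Char)) : Nat := out.countP (fun o => o.isNone)

theorem fill_append_some (out : List (Option Char)) :
    ∀ (src : List Char) (c : Char),
      fillData src (out ++ [some c]) = fillData src out ++ [c] := by
  induction out with
  | nil => intro src c; rfl
  | cons o rest ih =>
    intro src c
    cases o with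
    | some d => simp [fillData, ih]
    | none => simp [fillData, ih]

theorem fill_append_none (out : List (Option Char)) :
    ∀ (src : List Char),
      fillData src (out ++ [none]) =
        fillData src out ++ [(src.drop (countNones out)).headD ' '] := by
  induction out with
  | nil => intro src; simp [fillData, countNones]
  | cons o rest ih =>
    intro src
    cases o with
    | some d => simp [fillData, ih, countNones]
    | none =>
      have hdrop : ∀ (l : List Char) (k : Nat), l.drop (k + 1) = l.tail.drop k := by
        intro l k; cases l <;> simp
      have hcnt : countNones (none :: rest) = countNones rest + 1 := by
        simp [countNones]
      rw [List.cons_append, hcnt,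
          show fillData src (none :: (rest ++ [none])) =
            src.headD ' ' :: fillData src.tail (rest ++ [none]) from rfl,
          ih, hdrop]
      simp [fillData]

theorem countNones_range_pchar (correcto : List Char) (n : Nat) :
    countNones ((List.range n).map (pchar correcto)) = n - powCount n := by
  induction n with
  | zero => simp [countNones, powCount]
  | succ n ih =>
    rw [List.range_succ, List.map_append, List.map_cons, List.map_nil]
    unfold countNones at *
    rw [List.countP_append, ih]
    have hcle := powCount_le n
    by_cases hp : 2 ^ Nat.log2 (n + 1) = n + 1
    · have hcnt := powCount_succ_pow n hp
      unfold pchar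
      rw [if_pos hp]
      simp only [List.countP_cons, List.countP_nil]
      simp
      omega
    · have hpos : 1 ≤ n := by
        by_contra hc
        have : n = 0 := by omega
        subst this
        exact hp (by decide)
      have hcnt := powCount_succ_npow n hpos hp
      have := powCount_le (n + 1)
      unfold pchar
      rw [if_neg hp]
      simp only [List.countP_cons, List.countP_nil]
      simp
      omega

theorem rev_drop_headD (l : List Char) (k : Nat) :
    ((l.reverse.drop k).headD ' ') = (PySem.List.pyGet? l (-((k : Int) + 1))).getD ' ' := by
  by_cases hk : k < l.length
  · have hcast : (-((k : Int) + 1)) = (-(((k + 1 : Nat)) : Int)) := by push_cast; ring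
    rw [hcast, PySem.List.pyGet?_neg_natCast (xs := l) (k := k + 1) (by omega) (by omega)]
    have h1 : (l.reverse.drop k).head? = l.reverse[k]? := by
      simp [List.head?_drop]
    have h2 : l.reverse[k]? = l[l.length - 1 - k]? := List.getElem?_reverse (by simpa using hk)
    have h3 : l.length - 1 - k = l.length - (k + 1) := by omega
    rw [List.headD_eq_head?, h1, h2, h3]
  · have h1 : l.reverse.drop k = [] := by
      apply List.drop_eq_nil_of_le
      simpa using (by omega : l.length ≤ k)
    rw [h1]
    have h2 : PySem.List.pyGet? l (-((k : Int) + 1)) = none := by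
      rw [PySem.List.pyGet?_eq_none_iff]
      unfold PySem.Raise.InRange
      omega
    rw [h2]
    rfl

-- the fill pass over the placed slots yields the spec map
theorem fill_eq (data correcto : List Char) (n : Nat) :
    fillData data.reverse ((List.range n).map (pchar correcto)) =
      (PySem.List.pyRange 1 (1 + (n : Int)) 1).map (bchar data correcto) := by
  induction n with
  | zero =>
    rw [PySem.List.pyRange_one_eq_nil (by omega)]
    simp [fillData]
  | succ n ih =>
    have hsplit : PySem.List.pyRange 1 (1 + ((n + 1 : Nat) : Int)) 1 =
        PySem.List.pyRange 1 (1 + (n : Int)) 1 ++ [1 + (n : Int)] := by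
      have : (1 + ((n + 1 : Nat) : Int)) = (1 + (n : Int)) + 1 := by push_cast; ring
      rw [this, PySem.List.pyRange_one_succ_right (by omega)]
    rw [List.range_succ, List.map_append, List.map_cons, List.map_nil,
        hsplit, List.map_append, List.map_cons, List.map_nil]
    by_cases hp : 2 ^ Nat.log2 (n + 1) = n + 1
    · have htB : Int.land (1 + (n : Int)) (1 + (n : Int) - 1) = 0 := (testB_iff n).mpr hp
      rw [show pchar correcto n = some ((PySem.Chars.pyGet? correcto (-((n : Int) + 1))).getD ' ')
            by unfold pchar; rw [if_pos hp]]
      rw [fill_append_some, ih, bchar_pow _ _ _ htB]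
      rw [show (-(1 + (n : Int))) = -((n : Int) + 1) by ring]
    · have htB : ¬ Int.land (1 + (n : Int)) (1 + (n : Int) - 1) = 0 :=
        fun h => hp ((testB_iff n).mp h)
      have hpos : 1 ≤ n := by
        by_contra hc
        have : n = 0 := by omega
        subst this
        exact hp (by decide)
      rw [show pchar correcto n = none by unfold pchar; rw [if_neg hp]]
      rw [fill_append_none, ih, countNones_range_pchar, bchar_npow _ _ _ htB]
      congr 1
      rw [rev_drop_headD]
      have hidx := index_eq n hpos hp
      simp only [PySem.Chars.pyGet?_eq_listPyGet?]
      rw [show (-(1 + (n : Int) - pyBitLength (1 + (n : Int)))) =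
            -(((n - powCount n : Nat) : Int) + 1) by omega]

-- ===== VERDICT (by name: the statement is the Claim_ definition above) =====
theorem reemplazarArrayBits_spec : Claim_equal_reemplazarArrayBits := by
  intro data correcto r _ _
  unfold Spec_reemplazarArrayBits reemplazarArrayBits reemplazarArrayBits_alt
  set n := PySem.Str.len data + r with hn
  have hinit : (List.replicate n.toNat (none : Option Char)) =
      (List.range n.toNat).map (pcharU correcto.toList ((2 : Int) ^ 0)) := by
    apply List.ext_getElem
    · simp
    · intro t h1 h2
      simp only [List.getElem_replicate, List.getElem_map, List.getElem_range]
      unfold pcharU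
      rw [if_neg (by omega)]
  have hplaced : placePows correcto.toList n (n.toNat + 1) 1
        (List.replicate n.toNat (none : Option Char)) =
      (List.range n.toNat).map (pchar correcto.toList) := by
    rw [hinit, show (1 : Int) = (2 : Int) ^ 0 by norm_num]
    apply place_inv
    simp
  by_cases hle : n ≤ 0
  · rw [PySem.List.pyRange_one_eq_nil (show n + 1 ≤ 1 by omega)]
    have h0 : n.toNat = 0 := by omega
    rw [hplaced, h0]
    rfl
  · have hrange : n + 1 = 1 + ((n.toNat : Nat) : Int) := by omega
    rw [hrange, fold_inv, hplaced, fill_eq]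
    rw [PySem.List.slice?_none_none_neg_one]
    rfl
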